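-- pv_equiv track=rewrite | github.com/nightjuggler/aoc | 2017/20.py | part_one
-- ===== SOURCE A (Python) =====
-- def part_one(particles):
-- 	min_a = None
-- 	closest = None
--
-- 	for n, p in enumerate(particles):
-- 		a = sum(map(abs, p[6:9]))
-- 		if not closest or a < min_a:
-- 			min_a = a
-- 			closest = [n]
-- 		elif a == min_a:
-- 			closest.append(n)
--
-- 	if not closest:
-- 		return 'There are no particles!'
-- 	if len(closest) > 1:
-- 		return f'There are {len(closest)} particles with the same minimum acceleration ({min_a})!'
-- 	return f'Particle {closest[0]} has the minimum acceleration ({min_a})'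
-- ===== SOURCE B (Python) =====
-- def part_one(particles):
-- 	particles = list(particles)
-- 	mags = [sum(map(abs, p[6:9])) for p in particles]
-- 	if not mags:
-- 		return 'There are no particles!'
-- 	min_a = min(mags)
-- 	closest = [i for i, a in enumerate(mags) if a == min_a]
-- 	if len(closest) > 1:
-- 		return f'There are {len(closest)} particles with the same minimum acceleration ({min_a})!'
-- 	return f'Particle {closest[0]} has the minimum acceleration ({min_a})'
-- ===== Notes on version B (the rewrite author's own statement) =====
-- stated objective: simpler
-- what changed: Replaces the single stateful loop (running minimum with reset-or-append closest list) by a two-phase comprehension: build the magnitude list, take min() once, then collect the tying indices with a filter.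
import Mathlib
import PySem

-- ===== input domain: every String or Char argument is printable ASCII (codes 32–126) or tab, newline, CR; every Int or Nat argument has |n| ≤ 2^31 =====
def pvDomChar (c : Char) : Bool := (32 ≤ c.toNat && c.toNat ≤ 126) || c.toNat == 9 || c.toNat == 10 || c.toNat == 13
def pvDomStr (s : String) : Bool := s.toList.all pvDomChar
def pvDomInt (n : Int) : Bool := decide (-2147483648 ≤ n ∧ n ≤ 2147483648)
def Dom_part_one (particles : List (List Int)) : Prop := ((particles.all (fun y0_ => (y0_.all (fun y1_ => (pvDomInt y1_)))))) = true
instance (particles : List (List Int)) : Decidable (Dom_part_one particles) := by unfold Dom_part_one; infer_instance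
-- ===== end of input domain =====

-- B replaces A's single stateful loop (running minimum with reset-or-append closest list)
-- by a two-phase form: a magnitude list, min() once, then a filter for the tying indices (objective: simpler).


-- ===== PORT A =====
-- a = sum(map(abs, p[6:9]))
def pvMag (p : List Int) : Int :=
  ((PySem.List.slice p (some 6) (some 9)).map (fun x => |x|)).foldl (· + ·) 0

-- A's loop state: (min_a, closest); Python's (None, None) start is modelled as (0, []) —
-- min_a is never read while closest is empty ('not closest or a < min_a' short-circuits).
def pvStepA (s : Int × List Int) (q : Int × List Int) : Int × List Int :=
  let a := pvMag q.2
  if s.2 = [] ∨ a < s.1 then (a, [q.1])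
  else if a = s.1 then (s.1, s.2 ++ [q.1])
  else s

def part_one (particles : List (List Int)) : String :=
  let st := (PySem.List.enumerate particles 0).foldl pvStepA (0, [])
  if st.2 = [] then "There are no particles!"
  else if st.2.length > 1 then
    "There are " ++ PySem.Int.toStr (st.2.length : Int) ++
      " particles with the same minimum acceleration (" ++ PySem.Int.toStr st.1 ++ ")!"
  else
    "Particle " ++ PySem.Int.toStr (st.2.headD 0) ++ " has the minimum acceleration (" ++
      PySem.Int.toStr st.1 ++ ")"

-- ===== PORT B =====
def part_one_alt (particles : List (List Int)) : String :=
  let mags := particles.map pvMag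
  match mags with
  | [] => "There are no particles!"
  | m0 :: rest =>
    -- min(mags) is the running-min fold (PySem.List.min?_id_cons)
    let minA := rest.foldl min m0
    let closest := ((PySem.List.enumerate (m0 :: rest) 0).filter (fun q => q.2 == minA)).map (·.1)
    if closest.length > 1 then
      "There are " ++ PySem.Int.toStr (closest.length : Int) ++
        " particles with the same minimum acceleration (" ++ PySem.Int.toStr minA ++ ")!"
    else
      "Particle " ++ PySem.Int.toStr (closest.headD 0) ++ " has the minimum acceleration (" ++
        PySem.Int.toStr minA ++ ")"

-- ===== PRECONDITION & SPEC =====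
def Spec_part_one (particles : List (List Int)) (out : String) : Prop := out = part_one_alt particles
instance (particles : List (List Int)) (out : String) : Decidable (Spec_part_one particles out) := by unfold Spec_part_one; infer_instance

-- ===== CLAIM (what is proved, stated in full; the proofs are below) =====
def Claim_equal_part_one : Prop := ∀ (particles : List (List Int)), Dom_part_one particles → Spec_part_one particles (part_one particles)

-- ===== LEMMAS AND PROOFS =====

-- the filtered tying indices of a suffix, starting at index k, for minimum value m'
def pvTies (ps : List (List Int)) (k : Int) (m' : Int) : List Int :=
  ((PySem.List.enumerate ps k).filter (fun q => pvMag q.2 == m')).map (·.1)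

theorem pvTies_cons (p : List Int) (ps : List (List Int)) (k m' : Int) :
    pvTies (p :: ps) k m' =
      (if pvMag p = m' then [k] else []) ++ pvTies ps (k + 1) m' := by
  simp [pvTies, PySem.List.enumerate_cons, List.filter_cons]
  split_ifs <;> simp_all

-- helper: running min is ≤ its seed, and attained
theorem pvFoldlMin_le (l : List Int) : ∀ a : Int, l.foldl min a ≤ a := by
  induction l with
  | nil => intro a; simp
  | cons x t ih => intro a; exact le_trans (ih (min a x)) (min_le_left a x)

theorem pvFoldlMin_mem (l : List Int) : ∀ a : Int, l.foldl min a = a ∨ l.foldl min a ∈ l := by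
  induction l with
  | nil => intro a; simp
  | cons x t ih =>
    intro a
    rcases ih (min a x) with h | h
    · by_cases hax : a ≤ x
      · left; simpa [min_eq_left hax] using h
      · right; simp only [List.foldl_cons]; rw [h]; simp; omega
    · right; simp [List.foldl_cons, h]

-- loop invariant: from a nonempty-closest state (m, cs), the fold computes the running min
-- and the reset-or-append closest list has the filter characterisation
theorem pvLoopA_inv (ps : List (List Int)) :
    ∀ (k m : Int) (cs : List Int), cs ≠ [] →
      (PySem.List.enumerate ps k).foldl pvStepA (m, cs) =
        ((ps.map pvMag).foldl min m,
         (if (ps.map pvMag).foldl min m = m then cs else []) ++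
           pvTies ps k ((ps.map pvMag).foldl min m)) := by
  induction ps with
  | nil => intro k m cs _; simp [pvTies]
  | cons p rest ih =>
    intro k m cs hcs
    simp only [PySem.List.enumerate_cons, List.foldl_cons, List.map_cons]
    have hstep : pvStepA (m, cs) (k, p) =
        if pvMag p < m then (pvMag p, [k])
        else if pvMag p = m then (m, cs ++ [k]) else (m, cs) := by
      simp [pvStepA, hcs]
    rcases lt_trichotomy (pvMag p) m with hlt | heq | hgt
    · rw [hstep, if_pos hlt, ih (k+1) (pvMag p) [k] (by simp)]
      have hle := pvFoldlMin_le (rest.map pvMag) (pvMag p)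
      have hmin : min m (pvMag p) = pvMag p := by omega
      have hne : ¬((rest.map pvMag).foldl min (pvMag p) = m) := by omega
      simp only [hmin, pvTies_cons, hne, if_false, List.nil_append]
      by_cases hq : (rest.map pvMag).foldl min (pvMag p) = pvMag p
      · rw [if_pos hq, if_pos hq.symm]
      · rw [if_neg hq, if_neg (fun h => hq h.symm)]
    · rw [hstep, if_neg (by omega), if_pos heq, ih (k+1) m (cs ++ [k]) (by simp)]
      have hmin : min m (pvMag p) = m := by omega
      simp only [pvTies_cons, heq, min_self]
      by_cases hM : (rest.map pvMag).foldl min m = m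
      · rw [if_pos hM, if_pos hM, if_pos hM.symm, List.append_assoc]
      · rw [if_neg hM, if_neg hM, if_neg (fun h => hM h.symm), List.nil_append, List.nil_append]
    · rw [hstep, if_neg (by omega), if_neg (by omega), ih (k+1) m cs hcs]
      have hle := pvFoldlMin_le (rest.map pvMag) m
      have hmin : min m (pvMag p) = m := by omega
      have hne : ¬(pvMag p = (rest.map pvMag).foldl min m) := by omega
      simp only [hmin, pvTies_cons, hne, if_false, List.nil_append]

-- B's filter over enumerate(mags) picks exactly the tying particle indices
theorem pvTies_map (ps : List (List Int)) :
    ∀ (k m' : Int),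
      ((PySem.List.enumerate (ps.map pvMag) k).filter (fun q => q.2 == m')).map (·.1) =
        pvTies ps k m' := by
  induction ps with
  | nil => intro k m'; rfl
  | cons p rest ih =>
    intro k m'
    simp only [List.map_cons, PySem.List.enumerate_cons, List.filter_cons, pvTies_cons]
    by_cases h : pvMag p = m'
    · simp [h, ih]
    · simp [h, ih]

theorem pvTies_ne_nil (ps : List (List Int)) :
    ∀ (k m' : Int), m' ∈ ps.map pvMag → pvTies ps k m' ≠ [] := by
  induction ps with
  | nil => intro k m' h; simp at h
  | cons p rest ih =>
    intro k m' h
    rw [pvTies_cons]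
    simp only [List.map_cons, List.mem_cons] at h
    rcases h with h | h
    · simp [h]
    · intro hx
      rcases List.append_eq_nil_iff.mp hx with ⟨_, h2⟩
      exact ih (k+1) m' h h2

-- ===== VERDICT (by name: the statement is the Claim_ definition above) =====
theorem part_one_spec : Claim_equal_part_one := by
  intro particles _
  unfold Spec_part_one part_one part_one_alt
  cases particles with
  | nil => rfl
  | cons p rest =>
    simp only [List.map_cons, PySem.List.enumerate_cons, List.foldl_cons]
    have hstep0 : pvStepA (0, []) ((0 : Int), p) = (pvMag p, [0]) := by simp [pvStepA]
    rw [hstep0, pvLoopA_inv rest (0+1) (pvMag p) [0] (by simp)]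
    set M := (rest.map pvMag).foldl min (pvMag p) with hM
    set C : List Int := (if M = pvMag p then [0] else []) ++ pvTies rest (0+1) M with hC
    have hfilter : (((0, pvMag p) :: PySem.List.enumerate (rest.map pvMag) (0+1)).filter
        (fun q => q.2 == M)).map (·.1) = C := by
      have h0 : ((0, pvMag p) : Int × Int) :: PySem.List.enumerate (rest.map pvMag) (0+1) =
          PySem.List.enumerate ((p :: rest).map pvMag) 0 := by
        rw [List.map_cons, PySem.List.enumerate_cons]
      rw [h0, pvTies_map, pvTies_cons]
      by_cases h : pvMag p = M
      · rw [hC, if_pos h, if_pos h.symm]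
      · rw [hC, if_neg h, if_neg (fun h2 => h h2.symm)]
    have hCne : C ≠ [] := by
      rcases pvFoldlMin_mem (rest.map pvMag) (pvMag p) with h | h
      · rw [hC, if_pos h]; simp
      · intro hx
        rw [hC] at hx
        rcases List.append_eq_nil_iff.mp hx with ⟨_, h2⟩
        exact pvTies_ne_nil rest (0+1) M h h2
    rw [hfilter, if_neg hCne]
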